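-- pv_equiv track=rewrite | github.com/inassatus/wsu | 2018 Fall/cs355/HW3.py | addDictN
-- ===== SOURCE A (Python) =====
-- def addDict(d):
-- 	newdict={};
-- 	for course in d:
-- 		for day in d[course]:
-- 			if day in newdict:
-- 				newdict[day]+=d[course][day]
-- 			else:
-- 				newdict[day]=d[course][day]
-- 	return newdict
--
-- def addDictN(L):
-- 	newdict={}
-- 	for dic in L:
-- 		added = addDict(dic)
-- 		for day in added:
-- 			if day in newdict:
-- 				newdict[day] += added[day]
-- 			else:
-- 				newdict[day] = added[day]
-- 	return newdict
-- ===== SOURCE B (Python) =====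
-- def addDictN(L):
--     result = {}
--     for dic in L:
--         for course in dic:
--             for day in dic[course]:
--                 result[day] = result.get(day, 0) + dic[course][day]
--     return result
-- ===== Notes on version B (the rewrite author's own statement) =====
-- stated objective: simpler
-- what changed: B is one flat accumulation over all nested entries into a single result dict (result[day] = result.get(day,0) + v), eliminating A's per-dict subtotal dictionaries and the separate merge pass.
import Mathlib
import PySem

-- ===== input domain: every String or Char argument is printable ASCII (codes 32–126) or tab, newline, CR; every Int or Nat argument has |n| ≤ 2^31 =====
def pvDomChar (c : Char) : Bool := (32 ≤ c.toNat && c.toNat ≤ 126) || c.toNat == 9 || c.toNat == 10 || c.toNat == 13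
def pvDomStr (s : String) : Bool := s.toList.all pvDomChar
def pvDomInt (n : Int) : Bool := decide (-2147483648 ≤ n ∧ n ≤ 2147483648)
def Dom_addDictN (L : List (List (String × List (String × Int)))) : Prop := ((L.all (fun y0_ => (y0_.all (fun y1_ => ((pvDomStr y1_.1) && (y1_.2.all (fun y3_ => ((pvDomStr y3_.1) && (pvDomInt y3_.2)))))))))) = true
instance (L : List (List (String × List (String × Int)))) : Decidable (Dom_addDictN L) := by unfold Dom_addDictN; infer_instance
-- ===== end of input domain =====

-- B replaces A's two-phase (per-dict subtotal dict, then merge) by one flat accumulation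
-- into a single dict; same return value, no speed claim (objective: simpler).
-- ===== PORT A =====
-- the shared loop body 'if day in nd: nd[day] += v else: nd[day] = v' of addDict and addDictN
def pvStepA (nd : PySem.Dict String Int) (p : String × Int) : PySem.Dict String Int :=
  if nd.contains p.1 then nd.insert p.1 (nd.getD p.1 0 + p.2) else nd.insert p.1 p.2

-- helper addDict of A: per-dict subtotal
def addDict_helper (d : List (String × List (String × Int))) : PySem.Dict String Int :=
  d.foldl (fun nd cd => cd.2.foldl pvStepA nd) PySem.Dict.empty

def addDictN (L : List (List (String × List (String × Int)))) : List (String × Int) :=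
  (L.foldl (fun nd dic => (addDict_helper dic).items.foldl pvStepA nd) PySem.Dict.empty).items

-- ===== PORT B =====
-- B's loop body 'result[day] = result.get(day, 0) + v'
def pvStepB (nd : PySem.Dict String Int) (p : String × Int) : PySem.Dict String Int :=
  nd.insert p.1 (nd.getD p.1 0 + p.2)

def addDictN_alt (L : List (List (String × List (String × Int)))) : List (String × Int) :=
  (L.foldl (fun res dic => dic.foldl (fun res cd => cd.2.foldl pvStepB res) res) PySem.Dict.empty).items

-- ===== PRECONDITION & SPEC =====
def Spec_addDictN (L : List (List (String × List (String × Int)))) (out : List (String × Int)) : Prop := out = addDictN_alt L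
instance (L : List (List (String × List (String × Int)))) (out : List (String × Int)) : Decidable (Spec_addDictN L out) := by unfold Spec_addDictN; infer_instance

-- ===== CLAIM (what is proved, stated in full; the proofs are below) =====
def Claim_equal_addDictN : Prop := ∀ (L : List (List (String × List (String × Int)))), Dom_addDictN L → Spec_addDictN L (addDictN L)

-- ===== LEMMAS AND PROOFS =====

theorem stepA_eq_stepB : pvStepA = pvStepB := by
  funext nd p
  unfold pvStepA pvStepB
  by_cases h : nd.contains p.1 = true
  · simp [h]
  · rw [if_neg h, PySem.Dict.getD_of_not_contains nd 0 (by simpa using h), Int.zero_add]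

-- nested per-dict fold = fold over the flattened day lists
theorem foldl_flat (dic : List (String × List (String × Int))) (nd : PySem.Dict String Int) :
    dic.foldl (fun nd cd => cd.2.foldl pvStepB nd) nd
      = (dic.flatMap (fun cd => cd.2)).foldl pvStepB nd := by
  induction dic generalizing nd with
  | nil => rfl
  | cons cd t ih => simp [List.flatMap_cons, List.foldl_append, ih]

theorem contains_stepB (d : PySem.Dict String Int) (p : String × Int) (k : String)
    (h : d.contains k = true) : (pvStepB d p).contains k = true := by
  unfold pvStepB
  simp [PySem.Dict.contains_insert, h]

-- inserts at distinct keys commute when the first key is already present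
theorem insert_comm_of_contains (d : PySem.Dict String Int) (k k' : String) (a b : Int)
    (hne : k ≠ k') (hk : d.contains k = true) :
    (d.insert k a).insert k' b = (d.insert k' b).insert k a := by
  apply PySem.Dict.ext
  by_cases hk' : d.contains k' = true
  · have h1 : (d.insert k a).contains k' = true := by
      simp [PySem.Dict.contains_insert, hk']
    have h2 : (d.insert k' b).contains k = true := by
      simp [PySem.Dict.contains_insert, hk]
    rw [PySem.Dict.items_insert_of_contains (d.insert k a) b h1,
        PySem.Dict.items_insert_of_contains d a hk,
        PySem.Dict.items_insert_of_contains (d.insert k' b) a h2,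
        PySem.Dict.items_insert_of_contains d b hk']
    simp only [List.map_map]
    apply List.map_congr_left
    intro p _
    simp only [Function.comp_apply]
    by_cases hpk : p.1 = k
    · simp [hpk, hne]
    · by_cases hpk' : p.1 = k'
      · rcases eq_or_ne k' k with h | h
        · exact absurd h.symm hne
        · simp [h, hpk']
      · simp [hpk, hpk']
  · have h1 : (d.insert k a).contains k' = false := by
      simp [PySem.Dict.contains_insert, Ne.symm hne, hk']
    have h2 : (d.insert k' b).contains k = true := by
      simp [PySem.Dict.contains_insert, hk]
    rw [PySem.Dict.items_insert_of_not_contains (d.insert k a) b h1,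
        PySem.Dict.items_insert_of_contains d a hk,
        PySem.Dict.items_insert_of_contains (d.insert k' b) a h2,
        PySem.Dict.items_insert_of_not_contains d b (by simpa using hk')]
    simp [Ne.symm hne]

-- two B-steps at different keys commute, provided the first key is already present
theorem stepB_comm (d : PySem.Dict String Int) (k k' : String) (v v' : Int)
    (hne : k ≠ k') (hk : d.contains k = true) :
    pvStepB (pvStepB d (k, v)) (k', v') = pvStepB (pvStepB d (k', v')) (k, v) := by
  unfold pvStepB
  dsimp only
  simp only [PySem.Dict.getD_insert, if_neg hne, if_neg (Ne.symm hne)]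
  exact insert_comm_of_contains d k k' (d.getD k 0 + v) (d.getD k' 0 + v') hne hk

-- pushing a B-step at key k past a fold over pairs avoiding k, when k is present
theorem stepB_push (b : List (String × Int)) (d : PySem.Dict String Int) (k : String) (v : Int)
    (hk : d.contains k = true) (hb : ∀ p ∈ b, p.1 ≠ k) :
    b.foldl pvStepB (pvStepB d (k, v)) = pvStepB (b.foldl pvStepB d) (k, v) := by
  induction b generalizing d with
  | nil => rfl
  | cons q t ih =>
      obtain ⟨a, b⟩ := q
      simp only [List.foldl_cons]
      rw [stepB_comm d k a v b (Ne.symm (hb (a, b) (by simp))) hk]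
      exact ih (pvStepB d (a, b)) (contains_stepB d (a, b) k hk)
        (fun p hp => hb p (by simp [hp]))

-- combining two B-steps at the same key
theorem stepB_collapse (d : PySem.Dict String Int) (k : String) (w v : Int) :
    pvStepB (pvStepB d (k, w)) (k, v) = pvStepB d (k, w + v) := by
  unfold pvStepB
  rw [PySem.Dict.getD_insert_self, PySem.Dict.insert_insert_self, Int.add_assoc]

theorem stepB_mk_cons_ne (k1 k : String) (w v : Int) (t : List (String × Int)) (hne : k1 ≠ k) :
    pvStepB (PySem.Dict.mk ((k1, w) :: t)) (k, v)
      = PySem.Dict.mk ((k1, w) :: (pvStepB (PySem.Dict.mk t) (k, v)).items) := by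
  have hcc : (PySem.Dict.mk ((k1, w) :: t)).contains k = (PySem.Dict.mk t).contains k := by
    simp [PySem.Dict.contains, hne]
  have hg : (PySem.Dict.mk ((k1, w) :: t)).getD k 0 = (PySem.Dict.mk t).getD k 0 := by
    simp [PySem.Dict.getD, PySem.Dict.get?, hne]
  unfold pvStepB
  rw [hg]
  apply PySem.Dict.ext
  cases hc : (PySem.Dict.mk t).contains k with
  | true =>
      rw [PySem.Dict.items_insert_of_contains _ _ (hcc.trans hc),
          PySem.Dict.items_insert_of_contains _ _ hc]
      simp [hne]
  | false =>
      rw [PySem.Dict.items_insert_of_not_contains _ _ (hcc.trans hc),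
          PySem.Dict.items_insert_of_not_contains _ _ hc]
      simp

theorem stepB_mk_cons_self (k : String) (w v : Int) (t : List (String × Int))
    (hnt : ∀ p ∈ t, p.1 ≠ k) :
    pvStepB (PySem.Dict.mk ((k, w) :: t)) (k, v) = PySem.Dict.mk ((k, w + v) :: t) := by
  have hc : (PySem.Dict.mk ((k, w) :: t)).contains k = true := by
    simp [PySem.Dict.contains]
  have hg : (PySem.Dict.mk ((k, w) :: t)).getD k 0 = w := by
    simp [PySem.Dict.getD, PySem.Dict.get?]
  unfold pvStepB
  rw [hg]
  apply PySem.Dict.ext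
  rw [PySem.Dict.items_insert_of_contains _ _ hc]
  simp only [List.map_cons, beq_self_eq_true]
  refine congrArg _ ?_
  refine (List.map_congr_left ?_).trans (List.map_id t)
  intro p hp
  simp [hnt p hp]

-- folding nd through the items of (step (mk l) (k,v)) = step after folding nd through l
theorem foldl_items_step (l : List (String × Int)) (nd : PySem.Dict String Int) (k : String) (v : Int)
    (hnd : (l.map (fun p => p.1)).Nodup) :
    (pvStepB (PySem.Dict.mk l) (k, v)).items.foldl pvStepB nd
      = pvStepB (l.foldl pvStepB nd) (k, v) := by
  induction l generalizing nd with
  | nil =>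
      show (pvStepB (PySem.Dict.mk []) (k, v)).items.foldl pvStepB nd = pvStepB nd (k, v)
      simp [pvStepB, PySem.Dict.insert, PySem.Dict.contains, PySem.Dict.getD, PySem.Dict.get?]
  | cons q t ih =>
      obtain ⟨k1, w⟩ := q
      simp only [List.map_cons, List.nodup_cons, List.mem_map] at hnd
      obtain ⟨hk1, hnt⟩ := hnd
      by_cases hkk : k1 = k
      · subst hkk
        have hnt' : ∀ p ∈ t, p.1 ≠ k1 := fun p hp h => hk1 ⟨p, hp, h⟩
        rw [stepB_mk_cons_self k1 w v t hnt']
        show ((k1, w + v) :: t).foldl pvStepB nd = pvStepB (((k1, w) :: t).foldl pvStepB nd) (k1, v)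
        simp only [List.foldl_cons]
        rw [← stepB_collapse nd k1 w v]
        exact stepB_push t (pvStepB nd (k1, w)) k1 v
          (by simp [pvStepB, PySem.Dict.contains_insert_self]) hnt'
      · rw [stepB_mk_cons_ne k1 k w v t hkk]
        show ((k1, w) :: (pvStepB (PySem.Dict.mk t) (k, v)).items).foldl pvStepB nd
          = pvStepB (((k1, w) :: t).foldl pvStepB nd) (k, v)
        simp only [List.foldl_cons]
        exact ih (pvStepB nd (k1, w)) hnt

-- merging a subtotal dict into nd equals accumulating its source entries directly
theorem merge_eq_direct (xs : List (String × Int)) (d nd : PySem.Dict String Int)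
    (hd : d.keys.Nodup) :
    (xs.foldl pvStepB d).items.foldl pvStepB nd = xs.foldl pvStepB (d.items.foldl pvStepB nd) := by
  induction xs generalizing d nd with
  | nil => rfl
  | cons p xs ih =>
      obtain ⟨k, v⟩ := p
      simp only [List.foldl_cons]
      rw [ih (pvStepB d (k, v)) nd (by
        unfold pvStepB; exact PySem.Dict.nodup_keys_insert d k (d.getD k 0 + v) hd)]
      have hmk : PySem.Dict.mk d.items = d := by cases d; rfl
      have hstep := foldl_items_step d.items nd k v (by simpa [PySem.Dict.keys] using hd)
      rw [hmk] at hstep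
      rw [hstep]

-- ===== VERDICT (by name: the statement is the Claim_ definition above) =====
theorem addDictN_spec : Claim_equal_addDictN := by
  intro L _
  unfold Spec_addDictN addDictN addDictN_alt addDict_helper
  simp only [stepA_eq_stepB]
  refine congrArg PySem.Dict.items ?_
  have hfun : ∀ (nd : PySem.Dict String Int) (dic : List (String × List (String × Int))),
      (dic.foldl (fun nd cd => cd.2.foldl pvStepB nd) PySem.Dict.empty).items.foldl pvStepB nd
        = dic.foldl (fun res cd => cd.2.foldl pvStepB res) nd := by
    intro nd dic
    rw [foldl_flat dic PySem.Dict.empty, foldl_flat dic nd,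
        merge_eq_direct _ PySem.Dict.empty nd (by simp [PySem.Dict.keys, PySem.Dict.empty])]
    rfl
  have : (fun (nd : PySem.Dict String Int) (dic : List (String × List (String × Int))) =>
        (dic.foldl (fun nd cd => cd.2.foldl pvStepB nd) PySem.Dict.empty).items.foldl pvStepB nd)
      = fun res dic => dic.foldl (fun res cd => cd.2.foldl pvStepB res) res :=
    funext fun nd => funext fun dic => hfun nd dic
  rw [this]
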